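-- pv_equiv track=rewrite | github.com/khanhnamle1994/technical-interview-prep | Python-Programming/Arrays/Find-High-Low-Indices.py | find_high_index
-- ===== SOURCE A (Python) =====
-- def find_high_index(arr, key):
--     low = 0
--     high = len(arr) - 1
--     mid = int(high / 2)
--
--     # Binary Search
--     while low <= high:
--         mid_elem = arr[mid]
--         if mid_elem <= key:
--             low = mid + 1
--         else:
--             high = mid - 1
--
--         mid = low + int((high - low) / 2)
--
--     if high < len(arr) and arr[high] == key:
--         return high
--
--     return -1
-- ===== SOURCE B (Python) =====
-- def find_high_index(arr, key):
--     def helper(low, high):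
--         if low > high:
--             if 0 <= high and arr[high] == key:
--                 return high
--             return -1
--         mid = low + (high - low) // 2
--         if arr[mid] <= key:
--             return helper(mid + 1, high)
--         return helper(low, mid - 1)
--     return helper(0, len(arr) - 1)
-- ===== Notes on version B (the rewrite author's own statement) =====
-- stated objective: alternative
-- what changed: Replaced the iterative binary search with its explicit low/high/mid loop state and post-loop check by a recursive divide-and-conquer helper that recomputes the midpoint per call and performs the membership check in its base case.
import Mathlib
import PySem

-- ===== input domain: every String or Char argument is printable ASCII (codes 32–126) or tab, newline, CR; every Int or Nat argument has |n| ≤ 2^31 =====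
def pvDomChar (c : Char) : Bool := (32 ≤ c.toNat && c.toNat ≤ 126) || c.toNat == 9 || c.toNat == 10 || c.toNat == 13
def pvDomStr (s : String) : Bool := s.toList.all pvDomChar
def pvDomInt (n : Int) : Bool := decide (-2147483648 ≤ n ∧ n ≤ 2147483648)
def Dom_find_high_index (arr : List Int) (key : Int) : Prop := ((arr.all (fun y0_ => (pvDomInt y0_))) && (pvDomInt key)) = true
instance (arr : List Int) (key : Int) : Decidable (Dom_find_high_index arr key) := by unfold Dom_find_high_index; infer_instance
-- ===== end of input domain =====

-- B replaces A's iterative binary search (explicit low/high/mid loop state plus a post-loop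
-- check) by a recursive divide-and-conquer helper whose base case does the membership check;
-- objective: alternative decomposition, same result.

-- ===== PORT A =====
-- A's while-loop; fuel only makes the recursion structural (the caller passes enough fuel,
-- proved in the lemmas below; the 0-fuel branch is never reached).
def loopA (arr : List Int) (key : Int) (fuel : Nat) (low high mid : Int) : Int :=
  match fuel with
  | 0 => high
  | fuel + 1 =>
    if low ≤ high then
      let mid_elem := (PySem.List.pyGet? arr mid).getD 0  -- arr[mid]; in range whenever the loop runs
      if mid_elem ≤ key then
        let low' := mid + 1
        loopA arr key fuel low' high (low' + Int.tdiv (high - low') 2)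
      else
        let high' := mid - 1
        loopA arr key fuel low high' (low + Int.tdiv (high' - low) 2)
    else high

-- A's final 'if high < len(arr) and arr[high] == key'; pyGet? = none (IndexError, arr = [])
-- is excluded by Pre_, the .getD 0 there is never the returned value.
def finishA (arr : List Int) (key : Int) (high : Int) : Int :=
  if high < (arr.length : Int) then
    if (PySem.List.pyGet? arr high).getD 0 = key then high else -1
  else -1

-- int(high / 2) and int((high - low) / 2) truncate toward zero: Int.tdiv (exact, |n| ≤ 2^31).
def find_high_index (arr : List Int) (key : Int) : Int :=
  let n : Int := arr.length
  finishA arr key (loopA arr key (arr.length + 1) 0 (n - 1) (Int.tdiv (n - 1) 2))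

-- ===== PORT B =====
-- B's recursive helper; fuel only makes the recursion structural (the top-level call passes
-- enough fuel — the interval shrinks every call, proved below; the 0-fuel branch is never reached).
def helperB (arr : List Int) (key : Int) (fuel : Nat) (low high : Int) : Int :=
  match fuel with
  | 0 => -1
  | fuel + 1 =>
    if low > high then
      if 0 ≤ high ∧ (PySem.List.pyGet? arr high).getD 0 = key then high else -1
    else
      let mid := low + PySem.Int.floordiv (high - low) 2
      if (PySem.List.pyGet? arr mid).getD 0 ≤ key then
        helperB arr key fuel (mid + 1) high
      else
        helperB arr key fuel low (mid - 1)

def find_high_index_alt (arr : List Int) (key : Int) : Int :=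
  helperB arr key (arr.length + 2) 0 ((arr.length : Int) - 1)

-- ===== PRECONDITION & SPEC =====
-- Pre_ excludes only the empty list, on which Python A raises IndexError (arr[-1] after the loop).
def Pre_find_high_index (arr : List Int) (key : Int) : Prop := arr ≠ []
instance (arr : List Int) (key : Int) : Decidable (Pre_find_high_index arr key) := by
  unfold Pre_find_high_index; infer_instance

def pvWitness_find_high_index : List Int × Int := ([1, 2, 2, 3], 2)

def Spec_find_high_index (arr : List Int) (key : Int) (out : Int) : Prop := out = find_high_index_alt arr key
instance (arr : List Int) (key : Int) (out : Int) : Decidable (Spec_find_high_index arr key out) := by unfold Spec_find_high_index; infer_instance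

-- ===== CLAIM (what is proved, stated in full; the proofs are below) =====
def Claim_equal_find_high_index : Prop := ∀ (arr : List Int) (key : Int), Dom_find_high_index arr key → Pre_find_high_index arr key → Spec_find_high_index arr key (find_high_index arr key)


-- ===== LEMMAS AND PROOFS =====

lemma loop_eq (arr : List Int) (key : Int) :
    ∀ (fa fb : Nat) (low high mid : Int), 0 ≤ low → low ≤ high + 1 →
      high ≤ (arr.length : Int) - 1 → mid = low + Int.tdiv (high - low) 2 →
      (high - low + 1).toNat < fa → (high - low + 1).toNat < fb →
      finishA arr key (loopA arr key fa low high mid) = helperB arr key fb low high := by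
  intro fa
  induction fa with
  | zero => intro fb low high mid _ _ _ _ hfa _; omega
  | succ fa ih =>
    intro fb low high mid hlow hlh hhigh hmid hfa hfb
    obtain ⟨fb, rfl⟩ : ∃ fb', fb = fb' + 1 := ⟨fb - 1, by omega⟩
    by_cases h : low ≤ high
    · have hd : 0 ≤ high - low := by omega
      have htd : Int.tdiv (high - low) 2 = (high - low) / 2 := Int.tdiv_eq_ediv_of_nonneg hd
      have hfd : PySem.Int.floordiv (high - low) 2 = (high - low) / 2 :=
        PySem.Int.floordiv_eq_ediv_of_pos (by omega)
      have hq0 : 0 ≤ (high - low) / 2 := Int.ediv_nonneg hd (by omega)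
      have hqle : (high - low) / 2 ≤ high - low := Int.ediv_le_self _ hd
      simp only [loopA, helperB, if_pos h, if_neg (by omega : ¬ low > high)]
      rw [hfd, ← htd, ← hmid]
      by_cases hme : (PySem.List.pyGet? arr mid).getD 0 ≤ key
      · simp only [if_pos hme]
        exact ih fb (mid + 1) high _ (by omega) (by omega) hhigh rfl (by omega) (by omega)
      · simp only [if_neg hme]
        exact ih fb low (mid - 1) _ hlow (by omega) (by omega) rfl (by omega) (by omega)
    · simp only [loopA, helperB, if_neg h, if_pos (by omega : low > high)]
      unfold finishA
      by_cases hh0 : 0 ≤ high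
      · rw [if_pos (by omega)]
        by_cases hk : (PySem.List.pyGet? arr high).getD 0 = key
        · rw [if_pos hk, if_pos ⟨hh0, hk⟩]
        · rw [if_neg hk, if_neg (by tauto)]
      · have : high = -1 := by omega
        subst this
        rw [if_pos (by omega), if_neg (by simp : ¬ (0 ≤ (-1 : Int) ∧ (PySem.List.pyGet? arr (-1)).getD 0 = key))]
        split <;> rfl

-- ===== VERDICT (by name: the statement is the Claim_ definition above) =====
theorem find_high_index_spec : Claim_equal_find_high_index := by
  intro arr key _ _
  unfold Spec_find_high_index find_high_index find_high_index_alt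
  exact loop_eq arr key (arr.length + 1) (arr.length + 2) 0 ((arr.length : Int) - 1) _
    le_rfl (by omega) le_rfl (by rw [zero_add, sub_zero]) (by omega) (by omega)
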